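-- pv_equiv track=rewrite | github.com/bjhardcastle/visual_behavior_analysis | visual_behavior/translator/foraging2/extract_stimuli.py | _get_draw_epochs
-- ===== SOURCE A (Python) =====
-- def _get_draw_epochs(draw_log, start_frame, stop_frame):
--     """start_frame inclusive, stop_frame non-inclusive
--     """
--     draw_epochs = []
--     current_frame = start_frame
--
--     while current_frame <= stop_frame:
--         epoch_length = 0
--         while current_frame < stop_frame and draw_log[current_frame] == 1:
--             epoch_length += 1
--             current_frame += 1
--         else:
--             current_frame += 1
--
--         if epoch_length:
--             draw_epochs.append(
--                 (current_frame - epoch_length - 1, current_frame - 1, )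
--             )
--
--     return draw_epochs
-- ===== SOURCE B (Python) =====
-- def _get_draw_epochs(draw_log, start_frame, stop_frame):
--     """start_frame inclusive, stop_frame non-inclusive.
--     Edge-detection formulation: instead of scanning with run counters, take the
--     frame values, find the rising edges (a 1 whose predecessor is not 1) and the
--     falling edges (a 1 whose successor is not 1), and zip them into epochs.
--     """
--     vals = [draw_log[i] for i in range(start_frame, stop_frame)]
--     n = len(vals)
--     starts = [start_frame + i for i in range(n)
--               if vals[i] == 1 and (i == 0 or vals[i - 1] != 1)]
--     ends = [start_frame + i + 1 for i in range(n)
--             if vals[i] == 1 and (i == n - 1 or vals[i + 1] != 1)]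
--     return list(zip(starts, ends))
-- ===== Notes on version B (the rewrite author's own statement) =====
-- stated objective: alternative
-- what changed: Replaces A's stateful nested-while scan that counts each run's length with an edge-detection formulation: two comprehensions independently collect the rising edges (a 1 whose predecessor is not 1) and falling edges (a 1 whose successor is not 1) of the drawn-frame signal, and zip pairs them into epochs.
import Mathlib
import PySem

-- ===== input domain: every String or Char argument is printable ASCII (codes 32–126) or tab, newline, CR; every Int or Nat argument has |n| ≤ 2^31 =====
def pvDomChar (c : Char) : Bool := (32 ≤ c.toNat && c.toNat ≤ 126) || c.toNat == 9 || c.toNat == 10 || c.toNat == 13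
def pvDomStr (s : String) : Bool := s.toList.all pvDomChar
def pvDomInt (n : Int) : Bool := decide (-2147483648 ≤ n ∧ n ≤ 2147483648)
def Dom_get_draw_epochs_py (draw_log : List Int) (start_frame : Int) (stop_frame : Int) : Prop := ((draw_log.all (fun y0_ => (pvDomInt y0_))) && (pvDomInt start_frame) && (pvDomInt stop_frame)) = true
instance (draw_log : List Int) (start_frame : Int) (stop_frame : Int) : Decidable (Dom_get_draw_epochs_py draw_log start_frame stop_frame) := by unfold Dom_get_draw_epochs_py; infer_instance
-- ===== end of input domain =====

-- B replaces A's stateful run-counting scan by an edge-detection pass: it finds the rising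
-- edges and the falling edges of the drawn-frame signal independently and zips them into
-- epochs; objective: alternative, same O(n) cost.

-- ===== PORT A =====
-- inner while loop: returns (epoch_length, current_frame) at loop exit
-- (the `else: current_frame += 1` of the while always runs, so exit value is cur+1).
-- draw_log[current_frame] is pyGet?; the `.getD 0` default is only reached on inputs
-- excluded by Pre_ (where Python raises IndexError). The Nat fuel only makes the
-- loop total; it is (stop_frame - cur).toNat at the call site, enough for every iteration
-- (the loop condition needs cur < stop_frame), so the fuel-0 branch returns the loop-exit value.
def pvA_inner (draw_log : List Int) (stop_frame : Int) : Nat → Int → Int → Int × Int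
  | 0, cur, eplen => (eplen, cur + 1)
  | fuel + 1, cur, eplen =>
    if cur < stop_frame ∧ ((PySem.List.pyGet? draw_log cur).getD 0 == 1) = true then
      pvA_inner draw_log stop_frame fuel (cur + 1) (eplen + 1)
    else
      (eplen, cur + 1)

-- outer while loop; fuel (stop_frame + 1 - cur).toNat bounds the iteration count
-- (current_frame strictly increases), the fuel-0 branch is the loop-exit value []
def pvA_outer (draw_log : List Int) (stop_frame : Int) : Nat → Int → List (Int × Int)
  | 0, _cur => []
  | fuel + 1, cur =>
    if cur ≤ stop_frame then
      let r := pvA_inner draw_log stop_frame (stop_frame - cur).toNat cur 0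
      (if r.1 ≠ 0 then [(r.2 - r.1 - 1, r.2 - 1)] else []) ++
        pvA_outer draw_log stop_frame fuel r.2
    else []

def get_draw_epochs_py (draw_log : List Int) (start_frame : Int) (stop_frame : Int) : List (Int × Int) :=
  pvA_outer draw_log stop_frame (stop_frame + 1 - start_frame).toNat start_frame

-- ===== PORT B =====
-- the comprehension filter `vals[i] == 1 and (i == 0 or vals[i-1] != 1)` (rising edge);
-- vals.getD is exact here: Source B only reads vals[i-1]/vals[i+1] behind guards that keep
-- the index in range, and `or`/`and` short-circuit does not change the Bool value
def pvB_startP (vals : List Int) (i : Nat) : Bool :=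
  (vals.getD i 0 == 1) && (i == 0 || !(vals.getD (i - 1) 0 == 1))

-- the comprehension filter `vals[i] == 1 and (i == n-1 or vals[i+1] != 1)` (falling edge)
def pvB_endP (vals : List Int) (i : Nat) : Bool :=
  (vals.getD i 0 == 1) && (i == vals.length - 1 || !(vals.getD (i + 1) 0 == 1))

def pvB_starts (vals : List Int) : List Nat :=
  (List.range vals.length).filter (pvB_startP vals)

def pvB_ends (vals : List Int) : List Nat :=
  (List.range vals.length).filter (pvB_endP vals)

def get_draw_epochs_py_alt (draw_log : List Int) (start_frame : Int) (stop_frame : Int) : List (Int × Int) :=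
  let vals := (PySem.List.pyRange start_frame stop_frame 1).map
    (fun i => (PySem.List.pyGet? draw_log i).getD 0)
  List.zip ((pvB_starts vals).map (fun (i : Nat) => start_frame + (i : Int)))
           ((pvB_ends vals).map (fun (i : Nat) => start_frame + (i : Int) + 1))

-- ===== PRECONDITION & SPEC =====
-- Pre_ excludes exactly the inputs on which Python A raises IndexError: when any frame of
-- [start_frame, stop_frame) is outside [-len, len) A's draw_log[current_frame] raises
-- (both Pythons index the same frames, so B raises there too).
def Pre_get_draw_epochs_py (draw_log : List Int) (start_frame : Int) (stop_frame : Int) : Prop :=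
  stop_frame ≤ start_frame ∨
    (-(draw_log.length : Int) ≤ start_frame ∧ stop_frame ≤ (draw_log.length : Int))
instance (draw_log : List Int) (start_frame : Int) (stop_frame : Int) : Decidable (Pre_get_draw_epochs_py draw_log start_frame stop_frame) := by unfold Pre_get_draw_epochs_py; infer_instance

def pvWitness_get_draw_epochs_py : List Int × Int × Int := ([1, 0, 1, 1], 0, 4)

def Spec_get_draw_epochs_py (draw_log : List Int) (start_frame : Int) (stop_frame : Int) (out : List (Int × Int)) : Prop := out = get_draw_epochs_py_alt draw_log start_frame stop_frame
instance (draw_log : List Int) (start_frame : Int) (stop_frame : Int) (out : List (Int × Int)) : Decidable (Spec_get_draw_epochs_py draw_log start_frame stop_frame out) := by unfold Spec_get_draw_epochs_py; infer_instance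

-- ===== CLAIM (what is proved, stated in full; the proofs are below) =====
def Claim_equal_get_draw_epochs_py : Prop := ∀ (draw_log : List Int) (start_frame : Int) (stop_frame : Int), Dom_get_draw_epochs_py draw_log start_frame stop_frame → Pre_get_draw_epochs_py draw_log start_frame stop_frame → Spec_get_draw_epochs_py draw_log start_frame stop_frame (get_draw_epochs_py draw_log start_frame stop_frame)

-- ===== LEMMAS AND PROOFS =====

-- B's whole result for value list v with base frame idx (proof-only abbreviation)
def pvZipBE (idx : Int) (v : List Int) : List (Int × Int) :=
  List.zip ((pvB_starts v).map (fun (i : Nat) => idx + (i : Int)))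
           ((pvB_ends v).map (fun (i : Nat) => idx + (i : Int) + 1))

theorem pvZipBE_alt (draw_log : List Int) (start_frame stop_frame : Int) :
    get_draw_epochs_py_alt draw_log start_frame stop_frame =
      pvZipBE start_frame ((PySem.List.pyRange start_frame stop_frame 1).map
        (fun i => (PySem.List.pyGet? draw_log i).getD 0)) := rfl

-- filter over range (n+1) when index 0 is rejected: shift everything by one
theorem pv_filter_range_shift (p : Nat → Bool) (n : Nat) (h0 : p 0 = false) :
    (List.range (n + 1)).filter p =
      ((List.range n).filter (fun i => p (i + 1))).map (· + 1) := by
  rw [List.range_succ_eq_map, List.filter_cons, h0, List.filter_map]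
  simp [Function.comp_def, Nat.succ_eq_add_one]

-- filter over range (n+1) when index 0 is kept
theorem pv_filter_range_shift_pos (p : Nat → Bool) (n : Nat) (h0 : p 0 = true) :
    (List.range (n + 1)).filter p =
      0 :: ((List.range n).filter (fun i => p (i + 1))).map (· + 1) := by
  rw [List.range_succ_eq_map, List.filter_cons_of_pos h0, List.filter_map]
  simp [Function.comp_def, Nat.succ_eq_add_one]

-- Nat beq of successors
theorem pv_beq_succ (a b : Nat) : ((a + 1 == b + 1) : Bool) = (a == b) := by
  rw [Bool.eq_iff_iff]; simp

-- skipping a non-drawn head shifts both edge lists by one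
theorem pvB_starts_skip (x : Int) (xs : List Int) (hx : (x == 1) = false) :
    pvB_starts (x :: xs) = (pvB_starts xs).map (· + 1) := by
  unfold pvB_starts
  rw [show (x :: xs).length = xs.length + 1 from rfl,
    pv_filter_range_shift _ _ (by simp [pvB_startP, hx])]
  congr 1
  apply List.filter_congr
  intro i _
  cases i with
  | zero => simp [pvB_startP, hx]
  | succ j => simp [pvB_startP]

theorem pvB_ends_skip (x : Int) (xs : List Int) (hx : (x == 1) = false) :
    pvB_ends (x :: xs) = (pvB_ends xs).map (· + 1) := by
  unfold pvB_ends
  rw [show (x :: xs).length = xs.length + 1 from rfl,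
    pv_filter_range_shift _ _ (by simp [pvB_endP, hx])]
  congr 1
  apply List.filter_congr
  intro i hi
  have hi' : i < xs.length := List.mem_range.mp hi
  unfold pvB_endP
  rw [List.getD_cons_succ, List.getD_cons_succ,
    show (x :: xs).length - 1 = xs.length from rfl]
  have hb : ((i + 1 == xs.length) : Bool) = (i == xs.length - 1) := by
    rw [Bool.eq_iff_iff]; simp only [beq_iff_eq]; omega
  rw [hb]

-- prepending a drawn frame before a drawn head: the rising edge stays at 0
theorem pvB_starts_cons_one (y : Int) (ys : List Int) (hy : (y == 1) = true) :
    pvB_starts (1 :: y :: ys) = 0 :: ((pvB_starts (y :: ys)).tail.map (· + 1)) := by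
  have hL : pvB_starts (1 :: y :: ys) =
      0 :: (((List.range ys.length).filter
        (fun i => pvB_startP (1 :: y :: ys) (i + 1 + 1))).map (· + 1)).map (· + 1) := by
    unfold pvB_starts
    rw [show ((1 : Int) :: y :: ys).length = (ys.length + 1) + 1 from rfl,
      pv_filter_range_shift_pos _ _ (by simp [pvB_startP]),
      pv_filter_range_shift _ _ (by simp [pvB_startP, eq_of_beq hy])]
  have hR : pvB_starts (y :: ys) =
      0 :: ((List.range ys.length).filter
        (fun i => pvB_startP (y :: ys) (i + 1))).map (· + 1) := by
    unfold pvB_starts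
    rw [show (y :: ys).length = ys.length + 1 from rfl,
      pv_filter_range_shift_pos _ _ (by simp [pvB_startP, eq_of_beq hy])]
  rw [hL, hR, List.tail_cons]
  have hpq : (fun i => pvB_startP (1 :: y :: ys) (i + 1 + 1)) =
      (fun i => pvB_startP (y :: ys) (i + 1)) := by
    funext i; simp [pvB_startP]
  rw [hpq]

-- prepending a drawn frame before a drawn head: every falling edge shifts by one
theorem pvB_ends_cons_one (y : Int) (ys : List Int) (hy : (y == 1) = true) :
    pvB_ends (1 :: y :: ys) = (pvB_ends (y :: ys)).map (· + 1) := by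
  unfold pvB_ends
  rw [show ((1 : Int) :: y :: ys).length = (ys.length + 1) + 1 from rfl,
    pv_filter_range_shift _ _ (by simp [pvB_endP, hy])]
  congr 1
  apply List.filter_congr
  intro i hi
  have hi' : i < ys.length + 1 := List.mem_range.mp hi
  unfold pvB_endP
  rw [List.getD_cons_succ, List.getD_cons_succ,
    show ((1 : Int) :: y :: ys).length - 1 = ys.length + 1 from rfl,
    show (y :: ys).length - 1 = ys.length from rfl, pv_beq_succ]

-- run of m+1 drawn frames followed by r (empty, or starting non-drawn):
-- exactly one rising edge at 0, the rest is r's shifted by m+1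
theorem pv_run_side (r : List Int)
    (hr : r = [] ∨ ∃ y ys, r = y :: ys ∧ (y == 1) = false) :
    ∀ m : Nat,
      pvB_starts (List.replicate (m + 1) 1 ++ r) = 0 :: (pvB_starts r).map (· + (m + 1)) ∧
      pvB_ends (List.replicate (m + 1) 1 ++ r) = m :: (pvB_ends r).map (· + (m + 1)) := by
  intro m
  induction m with
  | zero =>
    rw [show List.replicate 1 (1 : Int) ++ r = 1 :: r from rfl]
    constructor
    · unfold pvB_starts
      rw [show ((1 : Int) :: r).length = r.length + 1 from rfl,
        pv_filter_range_shift_pos _ _ (by simp [pvB_startP])]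
      congr 1
      apply congrArg
      apply List.filter_congr
      intro i hi
      have hi' : i < r.length := List.mem_range.mp hi
      cases i with
      | zero =>
        obtain rfl | ⟨y, ys, rfl, hy⟩ := hr
        · simp at hi'
        · simp [pvB_startP, hy]
      | succ j => simp [pvB_startP]
    · unfold pvB_ends
      rw [show ((1 : Int) :: r).length = r.length + 1 from rfl,
        pv_filter_range_shift_pos _ _ (by
          obtain rfl | ⟨y, ys, rfl, hy⟩ := hr
          · simp [pvB_endP]
          · simp [pvB_endP, hy])]
      congr 1
      apply congrArg
      apply List.filter_congr
      intro i hi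
      have hi' : i < r.length := List.mem_range.mp hi
      unfold pvB_endP
      rw [List.getD_cons_succ, List.getD_cons_succ,
        show ((1 : Int) :: r).length - 1 = r.length from rfl]
      have hb : ((i + 1 == r.length) : Bool) = (i == r.length - 1) := by
        rw [Bool.eq_iff_iff]; simp only [beq_iff_eq]; omega
      rw [hb]
  | succ m ih =>
    have hrep : List.replicate (m + 1 + 1) (1 : Int) ++ r =
        1 :: (List.replicate (m + 1) 1 ++ r) := by
      rw [List.replicate_succ]; rfl
    obtain ⟨ys, hys⟩ : ∃ ys, List.replicate (m + 1) (1 : Int) ++ r = (1 : Int) :: ys := by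
      rw [List.replicate_succ]; exact ⟨List.replicate m 1 ++ r, rfl⟩
    constructor
    · rw [hrep, hys, pvB_starts_cons_one 1 ys (by simp), ← hys, ih.1]
      rw [List.tail_cons, List.map_map]
      congr 1
    · rw [hrep, hys, pvB_ends_cons_one 1 ys (by simp), ← hys, ih.2, List.map_cons,
        List.map_map]
      congr 1

-- zip-level corollaries of the edge lemmas
theorem pvZipBE_skip (idx : Int) (x : Int) (xs : List Int) (hx : (x == 1) = false) :
    pvZipBE idx (x :: xs) = pvZipBE (idx + 1) xs := by
  unfold pvZipBE
  rw [pvB_starts_skip x xs hx, pvB_ends_skip x xs hx, List.map_map, List.map_map]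
  congr 1 <;> (apply List.map_congr_left; intro i _; simp only [Function.comp_apply]; omega)

theorem pvZipBE_run (idx : Int) (K : Nat) (hK1 : 1 ≤ K) (r : List Int)
    (hr : r = [] ∨ ∃ y ys, r = y :: ys ∧ (y == 1) = false) :
    pvZipBE idx (List.replicate K 1 ++ r) =
      (idx, idx + (K : Int)) :: pvZipBE (idx + (K : Int)) r := by
  obtain ⟨m, rfl⟩ : ∃ m, K = m + 1 := ⟨K - 1, by omega⟩
  unfold pvZipBE
  rw [(pv_run_side r hr m).1, (pv_run_side r hr m).2, List.map_cons, List.map_cons,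
    List.zip_cons_cons, List.map_map, List.map_map]
  congr 1
  · congr 1 <;> (push_cast; ring)
  congr 1 <;> (apply List.map_congr_left; intro i _; simp only [Function.comp_apply]; omega)

-- throughout: f is the frame value at index i, l(cur) = [f i | i in range(cur, stop)]

-- the outer loop past the last frame returns [] whatever fuel remains
theorem pvA_outer_past (draw_log : List Int) (stop_frame : Int) (fuel : Nat) (cur : Int)
    (h : stop_frame < cur) : pvA_outer draw_log stop_frame fuel cur = [] := by
  cases fuel with
  | zero => rfl
  | succ m => rw [pvA_outer, if_neg (by omega)]

-- dropping the leading run of 1s lands on the frames from cur + (length of that run)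
theorem pv_drop_run (f : Int → Int) (stop_frame : Int) :
    ∀ n cur, (stop_frame - cur).toNat ≤ n →
      ((PySem.List.pyRange cur stop_frame 1).map f).dropWhile (· == 1) =
        (PySem.List.pyRange
          (cur + (((PySem.List.pyRange cur stop_frame 1).map f).takeWhile (· == 1)).length)
          stop_frame 1).map f := by
  intro n
  induction n with
  | zero =>
    intro cur h
    have hnil := PySem.List.pyRange_one_eq_nil (a := cur) (b := stop_frame) (by omega)
    rw [hnil]
    simp [hnil]
  | succ m ih =>
    intro cur h
    by_cases hcs : cur < stop_frame
    · rw [PySem.List.pyRange_one_cons hcs]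
      simp only [List.map_cons, List.takeWhile_cons, List.dropWhile_cons]
      by_cases h1 : (f cur == 1) = true
      · simp only [h1, if_true]
        rw [ih (cur + 1) (by omega)]
        congr 2
        simp only [List.length_cons]
        push_cast; ring
      · simp only [h1, if_false, Bool.false_eq_true, List.length_nil, Nat.cast_zero, add_zero]
        conv_rhs => rw [PySem.List.pyRange_one_cons hcs]
        simp
    · have hnil := PySem.List.pyRange_one_eq_nil (a := cur) (b := stop_frame) (by omega)
      rw [hnil]
      simp [hnil]

-- the element just after the leading run of 1s is not 1
theorem pv_head_drop_not (p : Int → Bool) :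
    ∀ (l : List Int) (y : Int) (ys : List Int), l.dropWhile p = y :: ys → p y = false := by
  intro l
  induction l with
  | nil => intro y ys h; simp [List.dropWhile] at h
  | cons a as ih =>
    intro y ys h
    rw [List.dropWhile_cons] at h
    by_cases ha : p a = true
    · rw [if_pos ha] at h; exact ih y ys h
    · rw [if_neg ha] at h
      obtain ⟨rfl, _⟩ : a = y ∧ as = ys := by
        constructor <;> [exact (List.cons.injEq _ _ _ _ ▸ h).1; exact (List.cons.injEq _ _ _ _ ▸ h).2]
      simpa using ha

-- the inner while loop counts exactly the leading run of 1s from cur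
theorem pvA_inner_eq (draw_log : List Int) (stop_frame : Int) :
    ∀ (fuel : Nat) (cur eplen : Int), (stop_frame - cur).toNat ≤ fuel →
      pvA_inner draw_log stop_frame fuel cur eplen =
        (eplen + ((((PySem.List.pyRange cur stop_frame 1).map
              (fun i => (PySem.List.pyGet? draw_log i).getD 0)).takeWhile (· == 1)).length : Int),
         cur + ((((PySem.List.pyRange cur stop_frame 1).map
              (fun i => (PySem.List.pyGet? draw_log i).getD 0)).takeWhile (· == 1)).length : Int) + 1) := by
  intro fuel
  induction fuel with
  | zero =>
    intro cur eplen h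
    rw [pvA_inner, PySem.List.pyRange_one_eq_nil (by omega)]
    simp
  | succ m ih =>
    intro cur eplen h
    by_cases hcs : cur < stop_frame
    · rw [PySem.List.pyRange_one_cons hcs]
      simp only [List.map_cons, List.takeWhile_cons]
      by_cases h1 : (((PySem.List.pyGet? draw_log cur).getD 0 : Int) == 1) = true
      · rw [pvA_inner, if_pos ⟨hcs, h1⟩, ih (cur + 1) (eplen + 1) (by omega)]
        simp only [h1, if_true, List.length_cons, Prod.mk.injEq]
        push_cast
        omega
      · rw [pvA_inner, if_neg (by intro hc; exact absurd hc.2 h1)]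
        simp [h1]
    · rw [pvA_inner, if_neg (by omega), PySem.List.pyRange_one_eq_nil (by omega)]
      simp

-- the leading run of 1s really is a replicate of 1s
theorem pv_take_replicate (l : List Int) :
    l.takeWhile (· == 1) = List.replicate (l.takeWhile (· == 1)).length 1 := by
  rw [List.eq_replicate_iff]
  refine ⟨rfl, fun b hb => ?_⟩
  exact eq_of_beq (List.mem_takeWhile_imp (p := (· == 1)) hb)

-- main loop correspondence: A's outer loop from frame cur equals B's edge-zip over the
-- frames in [cur, stop)
theorem pv_main (draw_log : List Int) (stop_frame : Int) :
    ∀ (fuel : Nat) (cur : Int), (stop_frame + 1 - cur).toNat ≤ fuel →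
      pvA_outer draw_log stop_frame fuel cur =
        pvZipBE cur ((PySem.List.pyRange cur stop_frame 1).map
          (fun i => (PySem.List.pyGet? draw_log i).getD 0)) := by
  intro fuel
  induction fuel with
  | zero =>
    intro cur h
    rw [PySem.List.pyRange_one_eq_nil (by omega)]
    simp [pvA_outer, pvZipBE, pvB_starts, pvB_ends]
  | succ m ih =>
    intro cur h
    by_cases hle : cur ≤ stop_frame
    · set f : Int → Int := fun i => (PySem.List.pyGet? draw_log i).getD 0 with hf
      rw [pvA_outer, if_pos hle]
      rw [pvA_inner_eq draw_log stop_frame (stop_frame - cur).toNat cur 0 (le_refl _)]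
      dsimp only
      set K : ℕ := (((PySem.List.pyRange cur stop_frame 1).map f).takeWhile (· == 1)).length with hK
      have hKlen : K ≤ (stop_frame - cur).toNat := by
        calc K ≤ ((PySem.List.pyRange cur stop_frame 1).map f).length :=
                (List.takeWhile_prefix _).length_le
          _ = (stop_frame - cur).toNat := by
                rw [List.length_map, PySem.List.length_pyRange_one]
      have hsplit : (PySem.List.pyRange cur stop_frame 1).map f =
          ((PySem.List.pyRange cur stop_frame 1).map f).takeWhile (· == 1) ++
            ((PySem.List.pyRange cur stop_frame 1).map f).dropWhile (· == 1) :=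
        (List.takeWhile_append_dropWhile).symm
      have hdrop : ((PySem.List.pyRange cur stop_frame 1).map f).dropWhile (· == 1) =
          (PySem.List.pyRange (cur + (K : Int)) stop_frame 1).map f := by
        have := pv_drop_run f stop_frame (stop_frame - cur).toNat cur (le_refl _)
        rw [← hK] at this
        exact this
      have hr : (PySem.List.pyRange (cur + (K : Int)) stop_frame 1).map f = [] ∨
          ∃ y ys, (PySem.List.pyRange (cur + (K : Int)) stop_frame 1).map f = y :: ys ∧
            (y == 1) = false := by
        cases hcase : (PySem.List.pyRange (cur + (K : Int)) stop_frame 1).map f with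
        | nil => exact Or.inl rfl
        | cons y ys =>
          refine Or.inr ⟨y, ys, rfl, ?_⟩
          apply pv_head_drop_not (· == 1) ((PySem.List.pyRange cur stop_frame 1).map f)
          rw [hdrop, hcase]
      by_cases hcs : cur < stop_frame
      · by_cases h1 : (f cur == 1) = true
        · -- run of 1s of length K ≥ 1 starting at cur
          have hKpos : 1 ≤ K := by
            rw [hK, PySem.List.pyRange_one_cons hcs]
            simp [h1]
          rw [if_pos (by exact_mod_cast by omega)]
          have hBside : pvZipBE cur ((PySem.List.pyRange cur stop_frame 1).map f) =
              (cur, cur + (K : Int)) ::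
                pvZipBE (cur + (K : Int)) ((PySem.List.pyRange (cur + (K : Int)) stop_frame 1).map f) := by
            rw [hsplit, pv_take_replicate, ← hK, hdrop]
            exact pvZipBE_run cur K hKpos _ hr
          rw [hBside, List.singleton_append]
          congr 1
          · simp only [Prod.mk.injEq]; constructor <;> omega
          -- tails: A continues at cur+K+1, B at cur+K over frames from cur+K
          by_cases hend : cur + (K : Int) < stop_frame
          · obtain ⟨y, ys, hys, hy1⟩ : ∃ y ys,
                (PySem.List.pyRange (cur + (K : Int)) stop_frame 1).map f = y :: ys ∧
                  (y == 1) = false := by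
              rcases hr with hnil | hok
              · rw [PySem.List.pyRange_one_cons hend, List.map_cons] at hnil
                exact absurd hnil (by simp)
              · exact hok
            rw [hys, pvZipBE_skip _ _ _ hy1]
            have hys' : ys = (PySem.List.pyRange (cur + (K : Int) + 1) stop_frame 1).map f := by
              rw [PySem.List.pyRange_one_cons hend, List.map_cons] at hys
              exact (List.cons.injEq _ _ _ _ ▸ hys).2.symm
            rw [hys', ih (cur + (K : Int) + 1) (by omega)]
          · have hKeq : cur + (K : Int) = stop_frame := by omega
            rw [hKeq, PySem.List.pyRange_one_eq_nil (le_refl _)]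
            rw [pvA_outer_past draw_log stop_frame m (stop_frame + 1) (by omega)]
            simp [pvZipBE, pvB_starts, pvB_ends]
        · -- frame cur is not 1: A records nothing and advances one frame
          have hK0 : K = 0 := by
            rw [hK, PySem.List.pyRange_one_cons hcs]
            simp [h1]
          simp only [hK0, Nat.cast_zero, add_zero]
          rw [if_neg (by simp)]
          rw [List.nil_append, ih (cur + 1) (by omega)]
          rw [PySem.List.pyRange_one_cons hcs, List.map_cons,
            pvZipBE_skip _ _ _ (by simpa using h1)]
      · -- cur = stop_frame: empty frame range, one final no-op outer iteration
        have hK0 : K = 0 := by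
          rw [hK, PySem.List.pyRange_one_eq_nil (by omega)]
          simp
        simp only [hK0, Nat.cast_zero, add_zero]
        rw [if_neg (by simp)]
        rw [List.nil_append,
          pvA_outer_past draw_log stop_frame m (cur + 1) (by omega),
          PySem.List.pyRange_one_eq_nil (by omega)]
        simp [pvZipBE, pvB_starts, pvB_ends]
    · rw [pvA_outer, if_neg hle, PySem.List.pyRange_one_eq_nil (by omega)]
      simp [pvZipBE, pvB_starts, pvB_ends]

-- ===== VERDICT (by name: the statement is the Claim_ definition above) =====
theorem get_draw_epochs_py_spec : Claim_equal_get_draw_epochs_py := by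
  intro draw_log start_frame stop_frame _ _
  unfold Spec_get_draw_epochs_py get_draw_epochs_py
  rw [pvZipBE_alt]
  exact pv_main draw_log stop_frame (stop_frame + 1 - start_frame).toNat start_frame (le_refl _)
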